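-- pv_equiv track=rewrite | github.com/sagrant/encrypt_genome | sharedPositions.py | findShared
-- ===== SOURCE A (Python) =====
-- def findShared(matchList):
--     match1 = 0
--     match2 = 0
--     match3 = 0
--     match4 = 0
--     match5 = 0
--     match6 = 0
--     match7 = 0
--     match8 = 0
--     for pos, sampleList in matchList:
--         if 'sub1' in sampleList:
--             match1 += 1
--         if 'sub2' in sampleList:
--             match2 += 1
--         if 'sub3' in sampleList:
--             match3 += 1
--         if 'sub4' in sampleList:
--             match4 += 1
--         if 'sub5' in sampleList:
--             match5 += 1
--         if 'sub6' in sampleList: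
--             match6 += 1
--         if 'sub7' in sampleList:
--             match7 += 1
--         if 'sub8' in sampleList:
--             match8 += 1
--         else:
--             continue
--     return match1, match2, match3, match4, match5, match6, match7, match8
-- ===== SOURCE B (Python) =====
-- def findShared(matchList):
--     samples = [sampleList for pos, sampleList in matchList]
--     return tuple(sum(('sub%d' % i) in s for s in samples) for i in range(1, 9))
-- ===== Notes on version B (the rewrite author's own statement) =====
-- stated objective: simpler
-- what changed: Replaced A's single interleaved loop carrying eight counters with an extract-samples pass followed by eight independent membership-count scans expressed as one comprehension.
import Mathlib
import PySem

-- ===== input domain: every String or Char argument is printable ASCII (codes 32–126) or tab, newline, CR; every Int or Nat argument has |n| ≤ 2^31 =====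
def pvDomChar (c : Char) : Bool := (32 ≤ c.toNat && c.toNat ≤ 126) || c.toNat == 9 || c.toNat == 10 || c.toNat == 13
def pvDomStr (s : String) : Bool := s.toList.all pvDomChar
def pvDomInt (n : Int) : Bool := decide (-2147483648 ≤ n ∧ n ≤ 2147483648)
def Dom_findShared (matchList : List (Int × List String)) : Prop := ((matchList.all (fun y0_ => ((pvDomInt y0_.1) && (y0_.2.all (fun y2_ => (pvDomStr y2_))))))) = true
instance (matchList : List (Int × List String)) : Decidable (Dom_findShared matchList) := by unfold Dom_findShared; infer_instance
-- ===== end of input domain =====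

-- B replaces A's single loop with eight counters by an extract-then-count decomposition
-- (one pass collecting the sample lists, then eight independent membership counts): simpler, same cost.

-- ===== PORT A =====
-- one interleaved pass carrying eight counters, exactly as A's for-loop
def findShared (matchList : List (Int × List String)) : Int × Int × Int × Int × Int × Int × Int × Int :=
  matchList.foldl
    (fun m p =>
      let s := p.2
      ((if "sub1" ∈ s then m.1 + 1 else m.1),
       (if "sub2" ∈ s then m.2.1 + 1 else m.2.1),
       (if "sub3" ∈ s then m.2.2.1 + 1 else m.2.2.1),
       (if "sub4" ∈ s then m.2.2.2.1 + 1 else m.2.2.2.1),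
       (if "sub5" ∈ s then m.2.2.2.2.1 + 1 else m.2.2.2.2.1),
       (if "sub6" ∈ s then m.2.2.2.2.2.1 + 1 else m.2.2.2.2.2.1),
       (if "sub7" ∈ s then m.2.2.2.2.2.2.1 + 1 else m.2.2.2.2.2.2.1),
       (if "sub8" ∈ s then m.2.2.2.2.2.2.2 + 1 else m.2.2.2.2.2.2.2)))
    (0, 0, 0, 0, 0, 0, 0, 0)

-- ===== PORT B =====
-- extract the sample lists once, then count each name's occurrences in its own scan
def pvCount (samples : List (List String)) (name : String) : Int :=
  Int.ofNat (samples.countP (fun s => decide (name ∈ s)))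

def findShared_alt (matchList : List (Int × List String)) : Int × Int × Int × Int × Int × Int × Int × Int :=
  let samples := matchList.map (fun p => p.2)
  (pvCount samples "sub1", pvCount samples "sub2", pvCount samples "sub3",
   pvCount samples "sub4", pvCount samples "sub5", pvCount samples "sub6",
   pvCount samples "sub7", pvCount samples "sub8")

-- ===== PRECONDITION & SPEC =====
def Spec_findShared (matchList : List (Int × List String)) (out : Int × Int × Int × Int × Int × Int × Int × Int) : Prop := out = findShared_alt matchList
-- explicit DecidableEq term for the 8-tuple (automatic synthesis exceeds the instance-size limit at this nesting depth)
def pvDecEq8 : DecidableEq (Int × Int × Int × Int × Int × Int × Int × Int) :=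
  let d1 : DecidableEq Int := inferInstance
  let d2 := @instDecidableEqProd _ _ d1 d1
  let d3 := @instDecidableEqProd _ _ d1 d2
  let d4 := @instDecidableEqProd _ _ d1 d3
  let d5 := @instDecidableEqProd _ _ d1 d4
  let d6 := @instDecidableEqProd _ _ d1 d5
  let d7 := @instDecidableEqProd _ _ d1 d6
  @instDecidableEqProd _ _ d1 d7
instance (matchList : List (Int × List String)) (out : Int × Int × Int × Int × Int × Int × Int × Int) : Decidable (Spec_findShared matchList out) := by unfold Spec_findShared; exact pvDecEq8 _ _

-- ===== CLAIM (what is proved, stated in full; the proofs are below) =====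
def Claim_equal_findShared : Prop := ∀ (matchList : List (Int × List String)), Dom_findShared matchList → Spec_findShared matchList (findShared matchList)

-- ===== LEMMAS AND PROOFS =====
-- loop invariant: A's fold from an arbitrary start adds, componentwise, B's eight counts
theorem findShared_fold_inv (l : List (Int × List String))
    (a1 a2 a3 a4 a5 a6 a7 a8 : Int) :
    l.foldl
      (fun m p =>
        let s := p.2
        ((if "sub1" ∈ s then m.1 + 1 else m.1),
         (if "sub2" ∈ s then m.2.1 + 1 else m.2.1),
         (if "sub3" ∈ s then m.2.2.1 + 1 else m.2.2.1),
         (if "sub4" ∈ s then m.2.2.2.1 + 1 else m.2.2.2.1),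
         (if "sub5" ∈ s then m.2.2.2.2.1 + 1 else m.2.2.2.2.1),
         (if "sub6" ∈ s then m.2.2.2.2.2.1 + 1 else m.2.2.2.2.2.1),
         (if "sub7" ∈ s then m.2.2.2.2.2.2.1 + 1 else m.2.2.2.2.2.2.1),
         (if "sub8" ∈ s then m.2.2.2.2.2.2.2 + 1 else m.2.2.2.2.2.2.2)))
      (a1, a2, a3, a4, a5, a6, a7, a8)
    = (a1 + pvCount (l.map (fun p => p.2)) "sub1",
       a2 + pvCount (l.map (fun p => p.2)) "sub2",
       a3 + pvCount (l.map (fun p => p.2)) "sub3",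
       a4 + pvCount (l.map (fun p => p.2)) "sub4",
       a5 + pvCount (l.map (fun p => p.2)) "sub5",
       a6 + pvCount (l.map (fun p => p.2)) "sub6",
       a7 + pvCount (l.map (fun p => p.2)) "sub7",
       a8 + pvCount (l.map (fun p => p.2)) "sub8") := by
  induction l generalizing a1 a2 a3 a4 a5 a6 a7 a8 with
  | nil => simp [pvCount]
  | cons hd tl ih =>
    rw [List.foldl_cons, ih]
    simp only [List.map_cons, pvCount, List.countP_cons, Prod.mk.injEq]
    refine ⟨?_, ?_, ?_, ?_, ?_, ?_, ?_, ?_⟩ <;>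
      · split <;> simp_all <;> omega

-- ===== VERDICT (by name: the statement is the Claim_ definition above) =====
theorem findShared_spec : Claim_equal_findShared := by
  intro matchList _
  unfold Spec_findShared findShared findShared_alt
  rw [findShared_fold_inv]
  simp
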